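-- pv_equiv track=rewrite | github.com/macsobel/VPX-Manager-for-ES-DE | backend/services/table_file_service.py | get_standard_name
-- ===== SOURCE A (Python) =====
-- def get_standard_name(name: str, manufacturer: str = "", year: str = "") -> str:
--     """Build a standardized name: 'Name (Manufacturer Year)'."""
--     if manufacturer and year:
--         base = f"{name} ({manufacturer} {year})"
--     elif manufacturer:
--         base = f"{name} ({manufacturer})"
--     elif year:
--         base = f"{name} ({year})"
--     else:
--         base = name
--
--     # Sanitize folder name: remove characters that are invalid in folder names
--     return "".join(c for c in base if c not in '<>:"/\\|?*').strip()
-- ===== SOURCE B (Python) =====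
-- def get_standard_name(name: str, manufacturer: str = "", year: str = "") -> str:
--     """Build a standardized name: 'Name (Manufacturer Year)'."""
--     bad = '<>:"/\\|?*'
--
--     def clean(s):
--         kept = []
--         for c in s:
--             if c not in bad:
--                 kept.append(c)
--         return kept
--
--     chars = clean(name)
--     if manufacturer or year:
--         chars += [' ', '(']
--         if manufacturer:
--             chars += clean(manufacturer)
--             if year:
--                 chars.append(' ')
--         if year:
--             chars += clean(year)
--         chars.append(')')
--     while chars and chars[0].isspace():
--         chars.pop(0)
--     while chars and chars[-1].isspace():
--         chars.pop()
--     return ''.join(chars)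
-- ===== Notes on version B (the rewrite author's own statement) =====
-- stated objective: alternative
-- what changed: B never builds the unsanitized base string: it sanitizes each component separately, assembles the result as a character-accumulator list, and trims whitespace with its own two while-loops instead of assembling first and then running one filter pass plus str.strip as A does.
import Mathlib
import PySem

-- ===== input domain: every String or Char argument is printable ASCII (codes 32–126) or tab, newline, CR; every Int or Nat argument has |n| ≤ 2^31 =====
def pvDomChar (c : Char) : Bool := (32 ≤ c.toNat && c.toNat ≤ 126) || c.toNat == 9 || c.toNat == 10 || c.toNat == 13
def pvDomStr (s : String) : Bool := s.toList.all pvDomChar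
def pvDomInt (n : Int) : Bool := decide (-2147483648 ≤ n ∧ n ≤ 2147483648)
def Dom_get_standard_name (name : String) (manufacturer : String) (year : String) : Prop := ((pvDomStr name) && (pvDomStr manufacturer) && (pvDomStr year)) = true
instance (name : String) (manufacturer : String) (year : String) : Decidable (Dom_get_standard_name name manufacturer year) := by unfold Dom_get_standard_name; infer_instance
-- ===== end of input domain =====

-- B sanitizes each component separately, assembles with an accumulator and trims with its own loops, instead of A's assemble-then-filter-then-strip; alternative decomposition, same values.
-- ===== PORT A =====
def pvForbidden : List Char := "<>:\"/\\|?*".toList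

def get_standard_name (name : String) (manufacturer : String) (year : String) : String :=
  let base : List Char :=
    if manufacturer ≠ "" ∧ year ≠ "" then
      name.toList ++ " (".toList ++ manufacturer.toList ++ " ".toList ++ year.toList ++ ")".toList
    else if manufacturer ≠ "" then
      name.toList ++ " (".toList ++ manufacturer.toList ++ ")".toList
    else if year ≠ "" then
      name.toList ++ " (".toList ++ year.toList ++ ")".toList
    else name.toList
  -- "".join(c for c in base if c not in '<>:"/\\|?*').strip()
  String.ofList (PySem.Chars.strip
    (base.foldl (fun acc c => if c ∉ pvForbidden then acc ++ [c] else acc) []))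

-- ===== PORT B =====
-- clean(s): explicit loop appending the characters not in `bad`
def pvClean (s : List Char) : List Char :=
  s.foldl (fun kept c => if c ∉ pvForbidden then kept ++ [c] else kept) []

-- while chars and chars[0].isspace(): chars.pop(0)
def pvTrimL : List Char → List Char
  | [] => []
  | c :: t => if PySem.Chars.isspace c then pvTrimL t else c :: t

-- while chars and chars[-1].isspace(): chars.pop()
def pvTrimR (l : List Char) : List Char :=
  if h : l ≠ [] ∧ PySem.Chars.isspace (l.getLastD 'a') then pvTrimR l.dropLast else l
termination_by l.length
decreasing_by
  have : 0 < l.length := List.length_pos_iff.mpr h.1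
  simp [List.length_dropLast]; omega

def get_standard_name_alt (name : String) (manufacturer : String) (year : String) : String :=
  let chars := pvClean name.toList
  let chars :=
    if manufacturer ≠ "" ∨ year ≠ "" then
      let chars := chars ++ [' ', '(']
      let chars :=
        if manufacturer ≠ "" then
          (chars ++ pvClean manufacturer.toList) ++
            (if year ≠ "" then [' '] else [])
        else chars
      let chars := if year ≠ "" then chars ++ pvClean year.toList else chars
      chars ++ [')']
    else chars
  String.ofList (pvTrimR (pvTrimL chars))

-- ===== PRECONDITION & SPEC =====
def Spec_get_standard_name (name : String) (manufacturer : String) (year : String) (out : String) : Prop := out = get_standard_name_alt name manufacturer year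
instance (name : String) (manufacturer : String) (year : String) (out : String) : Decidable (Spec_get_standard_name name manufacturer year out) := by unfold Spec_get_standard_name; infer_instance

-- ===== CLAIM =====
def Claim_equal_get_standard_name : Prop := ∀ (name : String) (manufacturer : String) (year : String), Dom_get_standard_name name manufacturer year → Spec_get_standard_name name manufacturer year (get_standard_name name manufacturer year)

-- ===== LEMMAS AND PROOFS =====
theorem pvClean_eq_filter (s : List Char) :
    pvClean s = s.filter (fun c => decide (c ∉ pvForbidden)) := by
  simpa [pvClean] using PySem.List.foldl_append_ite_eq_filter (fun c => c ∉ pvForbidden) s []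

theorem pvTrimL_eq (l : List Char) : pvTrimL l = l.dropWhile PySem.Chars.isspace := by
  induction l with
  | nil => rfl
  | cons c t ih => simp [pvTrimL, List.dropWhile, ih]; split <;> simp_all

theorem pvTrimR_reverse (r : List Char) :
    pvTrimR r.reverse = (r.dropWhile PySem.Chars.isspace).reverse := by
  induction r with
  | nil => rw [pvTrimR]; simp
  | cons c t ih =>
    rw [List.reverse_cons, pvTrimR]
    by_cases hsp : PySem.Chars.isspace c = true
    · rw [dif_pos ⟨by simp, by simpa using hsp⟩]
      simpa [List.dropWhile, hsp] using ih
    · rw [dif_neg (by simp [hsp])]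
      simp [List.dropWhile, hsp]

theorem pvTrimR_eq (l : List Char) :
    pvTrimR l = (l.reverse.dropWhile PySem.Chars.isspace).reverse := by
  have := pvTrimR_reverse l.reverse
  simpa using this

-- ===== VERDICT =====
theorem get_standard_name_spec : Claim_equal_get_standard_name := by
  intro name manufacturer year _
  unfold Spec_get_standard_name get_standard_name get_standard_name_alt
  by_cases hm : manufacturer = "" <;> by_cases hy : year = "" <;>
    simp only [hm, hy, pvClean_eq_filter, pvTrimL_eq, pvTrimR_eq,
      PySem.Chars.strip, PySem.Chars.lstrip, PySem.Chars.rstrip,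
      PySem.List.foldl_append_ite_eq_filter, List.filter_append] <;>
    simp [hm, hy, List.filter_cons, List.filter_append,
      show ¬(' ' ∈ pvForbidden) from by decide, show ¬('(' ∈ pvForbidden) from by decide,
      show ¬(')' ∈ pvForbidden) from by decide, show (List.filter (fun x => !decide (x ∈ pvForbidden)) [' ', '(']) = [' ', '('] from by decide,
      show (List.filter (fun x => !decide (x ∈ pvForbidden)) [' ']) = [' '] from by decide,
      show (List.filter (fun x => !decide (x ∈ pvForbidden)) [')']) = [')'] from by decide]
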